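-- pv_equiv track=rewrite | github.com/bshankar/hackerrank | src/strings/anagram.py | min_steps_to_anagram
-- ===== SOURCE A (Python) =====
-- def min_steps_to_anagram(s):
--     if len(s) % 2 != 0:
--         return -1
--
--     s1 = list(sorted(s[:len(s) // 2]))
--     s2 = list(sorted(s[len(s) // 2:]))
--     for ch in s1:
--         if not s2:
--             return 0
--
--         if ch in s2:
--             s2.remove(ch)
--     return len(s2)
-- ===== SOURCE B (Python) =====
-- def min_steps_to_anagram(s):
--     if len(s) % 2 != 0:
--         return -1
--     h = len(s) // 2
--     s1 = sorted(s[:h])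
--     s2 = sorted(s[h:])
--     i = j = m = 0
--     while i < h and j < h:
--         if s1[i] == s2[j]:
--             m += 1
--             i += 1
--             j += 1
--         elif s1[i] < s2[j]:
--             i += 1
--         else:
--             j += 1
--     return h - m
-- ===== Notes on version B (the rewrite author's own statement) =====
-- stated objective: faster
-- what changed: Replaces A's per-character membership scan and list.remove over the second half by a single linear two-pointer merge of the two sorted halves counting matches.
import Mathlib
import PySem

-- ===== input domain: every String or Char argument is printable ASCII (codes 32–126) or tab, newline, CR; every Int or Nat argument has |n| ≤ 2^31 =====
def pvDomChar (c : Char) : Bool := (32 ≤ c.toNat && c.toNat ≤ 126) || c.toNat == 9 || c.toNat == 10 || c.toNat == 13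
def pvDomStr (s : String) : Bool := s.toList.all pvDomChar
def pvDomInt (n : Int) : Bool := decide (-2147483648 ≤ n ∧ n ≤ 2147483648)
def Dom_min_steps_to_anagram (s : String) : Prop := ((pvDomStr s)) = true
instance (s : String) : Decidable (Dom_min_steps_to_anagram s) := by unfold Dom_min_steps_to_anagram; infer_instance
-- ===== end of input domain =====

-- B replaces A's quadratic membership-scan-and-remove loop over the second half by a
-- linear two-pointer merge over the two sorted halves (objective: faster).

-- ===== PORT A =====
-- A's for-loop: for ch in s1: if not s2: return 0; if ch in s2: s2.remove(ch); finally len(s2)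
def pvALoop : List Char → List Char → Int
  | [], s2 => (s2.length : Int)
  | ch :: rest, s2 =>
      if s2 = [] then 0
      else if ch ∈ s2 then pvALoop rest (s2.erase ch)
      else pvALoop rest s2

def min_steps_to_anagram (s : String) : Int :=
  if PySem.Int.mod (PySem.Str.len s) 2 ≠ 0 then -1
  else
    pvALoop
      (PySem.List.sorted (PySem.List.slice s.toList none (some (PySem.Int.floordiv (PySem.Str.len s) 2))) (fun c => c) false)
      (PySem.List.sorted (PySem.List.slice s.toList (some (PySem.Int.floordiv (PySem.Str.len s) 2)) none) (fun c => c) false)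

-- ===== PORT B =====
-- B's while-loop over indices i, j with accumulator m, as recursion on the two suffixes
def pvMerge : List Char → List Char → Int → Int
  | [], _, m => m
  | _, [], m => m
  | a :: as, b :: bs, m =>
      if a = b then pvMerge as bs (m + 1)
      else if a < b then pvMerge as (b :: bs) m
      else pvMerge (a :: as) bs m
termination_by l1 l2 _ => l1.length + l2.length

def min_steps_to_anagram_alt (s : String) : Int :=
  if PySem.Int.mod (PySem.Str.len s) 2 ≠ 0 then -1
  else
    PySem.Int.floordiv (PySem.Str.len s) 2 -
      pvMerge
        (PySem.List.sorted (PySem.List.slice s.toList none (some (PySem.Int.floordiv (PySem.Str.len s) 2))) (fun c => c) false)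
        (PySem.List.sorted (PySem.List.slice s.toList (some (PySem.Int.floordiv (PySem.Str.len s) 2)) none) (fun c => c) false) 0

-- ===== PRECONDITION & SPEC =====
def Spec_min_steps_to_anagram (s : String) (out : Int) : Prop := out = min_steps_to_anagram_alt s
instance (s : String) (out : Int) : Decidable (Spec_min_steps_to_anagram s out) := by unfold Spec_min_steps_to_anagram; infer_instance

-- ===== CLAIM (what is proved, stated in full; the proofs are below) =====
def Claim_equal_min_steps_to_anagram : Prop := ∀ (s : String), Dom_min_steps_to_anagram s → Spec_min_steps_to_anagram s (min_steps_to_anagram s)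

-- ===== LEMMAS AND PROOFS =====

-- A's loop computes the length of the multiset difference s2 \ s1
theorem pvALoop_eq_diff (s1 s2 : List Char) :
    pvALoop s1 s2 = ((s2.diff s1).length : Int) := by
  induction s1 generalizing s2 with
  | nil => simp [pvALoop]
  | cons ch rest ih =>
    by_cases h2 : s2 = []
    · subst h2; simp [pvALoop, List.nil_diff]
    · by_cases hm : ch ∈ s2
      · simp [pvALoop, h2, hm, List.diff_cons, ih]
      · simp [pvALoop, h2, hm, List.diff_cons, List.erase_of_not_mem hm, ih]

theorem cons_diff_of_not_mem (c : Char) (xs l : List Char) (h : c ∉ l) :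
    (c :: xs).diff l = c :: xs.diff l := by
  induction l generalizing xs with
  | nil => simp
  | cons y l ih =>
    have hyc : y ≠ c := fun he => h (by simp [he])
    rw [List.diff_cons, List.diff_cons, List.erase_cons_tail (by simp [Ne.symm hyc]),
      ih _ (fun hc => h (by simp [hc]))]

-- the merge loop on sorted lists counts the matched pairs: m + |s2| - |s2 \ s1|
theorem pvMerge_eq (s1 s2 : List Char) (m : Int)
    (h1 : s1.Pairwise (fun a b => a ≤ b)) (h2 : s2.Pairwise (fun a b => a ≤ b)) :
    pvMerge s1 s2 m = m + (s2.length : Int) - ((s2.diff s1).length : Int) := by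
  induction hn : s1.length + s2.length using Nat.strong_induction_on generalizing s1 s2 m with
  | _ n ih =>
  match s1, s2 with
  | [], s2 => simp [pvMerge]
  | a :: as, [] => simp [pvMerge, List.nil_diff]
  | a :: as, b :: bs =>
    rcases List.pairwise_cons.mp h1 with ⟨ha, has⟩
    rcases List.pairwise_cons.mp h2 with ⟨hb, hbs⟩
    have hn' : as.length + bs.length + 2 = n := by simp at hn; omega
    by_cases hab : a = b
    · subst hab
      rw [pvMerge, if_pos rfl, List.diff_cons, List.erase_cons_head,
        ih (as.length + bs.length) (by omega) as bs (m + 1) has hbs rfl]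
      simp only [List.length_cons]
      push_cast
      ring
    · by_cases hlt : a < b
      · have hnotmem : a ∉ b :: bs := by
          intro hmem
          have hba : b ≤ a := by
            rcases List.mem_cons.mp hmem with h | h
            · exact le_of_eq h.symm
            · exact hb a h
          exact absurd hlt (not_lt.mpr hba)
        rw [pvMerge, if_neg hab, if_pos hlt, List.diff_cons,
          List.erase_of_not_mem hnotmem,
          ih (as.length + (b :: bs).length) (by simp; omega) as (b :: bs) m has h2 rfl]
      · have hba : b < a := lt_of_le_of_ne (le_of_not_gt hlt) (Ne.symm hab)
        have hnotmem : b ∉ a :: as := by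
          intro hmem
          have hle : a ≤ b := by
            rcases List.mem_cons.mp hmem with h | h
            · exact le_of_eq h.symm
            · exact ha b h
          exact absurd hba (not_lt.mpr hle)
        rw [pvMerge, if_neg hab, if_neg hlt,
          ih ((a :: as).length + bs.length) (by simp; omega) (a :: as) bs m h1 hbs rfl,
          cons_diff_of_not_mem b bs (a :: as) hnotmem]
        simp only [List.length_cons]
        push_cast
        ring

-- ===== VERDICT (by name: the statement is the Claim_ definition above) =====
theorem min_steps_to_anagram_spec : Claim_equal_min_steps_to_anagram := by
  intro s _
  unfold Spec_min_steps_to_anagram min_steps_to_anagram min_steps_to_anagram_alt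
  by_cases hodd : PySem.Int.mod (PySem.Str.len s) 2 ≠ 0
  · rw [if_pos hodd, if_pos hodd]
  · rw [if_neg hodd, if_neg hodd]
    simp only [ne_eq, not_not] at hodd
    set h := PySem.Int.floordiv (PySem.Str.len s) 2 with hh
    set s1 := PySem.List.sorted (PySem.List.slice s.toList none (some h)) (fun c => c) false with hs1
    set s2 := PySem.List.sorted (PySem.List.slice s.toList (some h) none) (fun c => c) false with hs2
    have p1 : s1.Pairwise (fun a b => a ≤ b) := PySem.List.sorted_pairwise _ _
    have p2 : s2.Pairwise (fun a b => a ≤ b) := PySem.List.sorted_pairwise _ _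
    have hn : PySem.Str.len s = (s.toList.length : Int) := by
      simp [PySem.Str.len_eq]
    have hmod : s.toList.length % 2 = 0 := by
      rw [hn] at hodd
      have h2 := PySem.Int.mod_natCast s.toList.length 2
      push_cast at h2
      omega
    have hfd : h = ((s.toList.length / 2 : Nat) : Int) := by
      rw [hh, hn]
      exact_mod_cast PySem.Int.floordiv_natCast s.toList.length 2
    have hlen2 : (s2.length : Int) = h := by
      have hslice : PySem.List.slice s.toList (some h) none = s.toList.drop (s.toList.length / 2) := by
        rw [hfd]; exact PySem.List.slice_from_natCast _ _
      rw [hs2, PySem.List.length_sorted, hslice, List.length_drop, hfd]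
      omega
    rw [pvALoop_eq_diff, pvMerge_eq s1 s2 0 p1 p2, ← hlen2]
    have hle : ((s2.diff s1).length : Int) ≤ (s2.length : Int) := by
      exact_mod_cast (List.diff_sublist s2 s1).length_le
    omega
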